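-- pv_equiv track=rewrite | github.com/manologg/code-jam | 2021/qr/a/a.py | solve
-- ===== SOURCE A (Python) =====
-- def solve(n, l):
--     cost = 0
--     for i in range(n-1):
--         n = min(l[i:])
--         j = l.index(n, i)
--         start = l[:i]
--         middle = list(reversed(l[i:j+1]))
--         end = l[j+1:]
--         l = start + middle + end
--         cost += len(middle)
--     return cost
-- ===== SOURCE B (Python) =====
-- def solve(n, l):
--     # Work only on the shrinking unsorted suffix: no fixed prefix is kept or
--     # rebuilt, the cost of a step is index(min)+1 within the suffix.
--     cost, xs, k = 0, l, n - 1
--     while k > 0: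
--         j = xs.index(min(xs))
--         cost += j + 1
--         xs = xs[:j][::-1] + xs[j+1:]
--         k -= 1
--     return cost
-- ===== Notes on version B (the rewrite author's own statement) =====
-- stated objective: simpler
-- what changed: A keeps the full list and an index i, rebuilding prefix+reversed middle+suffix on every iteration of a counted for-loop; B discards the sorted prefix entirely and iterates on the shrinking unsorted suffix alone, the cost of a step being index(min)+1 within the suffix.
import Mathlib
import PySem

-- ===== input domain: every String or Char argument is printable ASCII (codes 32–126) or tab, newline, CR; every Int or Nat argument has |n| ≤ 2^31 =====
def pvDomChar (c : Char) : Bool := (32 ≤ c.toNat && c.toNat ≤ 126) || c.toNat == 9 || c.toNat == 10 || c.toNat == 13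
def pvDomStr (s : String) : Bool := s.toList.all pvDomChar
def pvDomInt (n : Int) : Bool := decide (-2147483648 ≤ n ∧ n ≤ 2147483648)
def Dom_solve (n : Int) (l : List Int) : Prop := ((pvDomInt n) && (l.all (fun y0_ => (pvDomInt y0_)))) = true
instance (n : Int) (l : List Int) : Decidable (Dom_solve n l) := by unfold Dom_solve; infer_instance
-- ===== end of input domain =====

-- B replaces A's full-list rebuilding loop by a recursion on the shrinking unsorted suffix (simpler; same value).

-- ===== PORT A =====
-- one loop iteration: state (cost, l), loop variable i
def solveStep (st : Int × List Int) (i : Int) : Int × List Int :=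
  let cost := st.1
  let l := st.2
  -- n = min(l[i:]) ; min([]) raises ValueError (excluded by Pre_solve): keep state unchanged there
  match PySem.List.min? (PySem.List.slice l (some i) none) (fun x => x) with
  | none => st
  | some m =>
    -- j = l.index(n, i): first index ≥ i holding m; here i ≥ 0 and m ∈ l[i:], so it is
    -- i + (index of m in l[i:]) — ported exactly that way (ValueError impossible, state kept)
    match PySem.List.index? (PySem.List.slice l (some i) none) m with
    | none => st
    | some j0 =>
      let j : Int := i + (j0 : Int)
      let start := PySem.List.slice l none (some i)
      let middle := (PySem.List.slice l (some i) (some (j + 1))).reverse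
      let endp := PySem.List.slice l (some (j + 1)) none
      (cost + (middle.length : Int), start ++ middle ++ endp)

def solve (n : Int) (l : List Int) : Int :=
  ((PySem.List.pyRange 0 (n - 1) 1).foldl solveStep (0, l)).1

-- ===== PORT B =====
-- the while-loop on (cost, xs, k) as recursion on the counter k; min([]) raises (excluded by Pre_solve), return 0 there
def solveAltGo (k : Int) (xs : List Int) : Int :=
  if k ≤ 0 then 0
  else
    match PySem.List.min? xs (fun x => x) with
    | none => 0
    | some m =>
      match PySem.List.index? xs m with
      | none => 0
      | some j =>
        (j : Int) + 1 + solveAltGo (k - 1)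
          ((PySem.List.slice xs none (some (j : Int))).reverse ++
            PySem.List.slice xs (some ((j : Int) + 1)) none)
termination_by k.toNat
decreasing_by omega

def solve_alt (n : Int) (l : List Int) : Int := solveAltGo (n - 1) l

-- ===== PRECONDITION & SPEC =====
-- A (and B) raise ValueError (min of an empty sequence) exactly when n > len(l) + 1
def Pre_solve (n : Int) (l : List Int) : Prop := n ≤ (l.length : Int) + 1
instance (n : Int) (l : List Int) : Decidable (Pre_solve n l) := by unfold Pre_solve; infer_instance

def pvWitness_solve : Int × List Int := (4, [3, 1, 2, 4])

def Spec_solve (n : Int) (l : List Int) (out : Int) : Prop := out = solve_alt n l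
instance (n : Int) (l : List Int) (out : Int) : Decidable (Spec_solve n l out) := by unfold Spec_solve; infer_instance

-- ===== CLAIM (what is proved, stated in full; the proofs are below) =====
def Claim_equal_solve : Prop := ∀ (n : Int) (l : List Int), Dom_solve n l → Pre_solve n l → Spec_solve n l (solve n l)

-- ===== LEMMAS AND PROOFS =====
-- loop invariant: the fold over the indices i, i+1, …, i+c-1 started at (cost, l)
-- yields cost + go c (suffix of l from i)
lemma solve_key (c : Nat) : ∀ (i cost : Int) (l : List Int), 0 ≤ i → i + (c : Int) ≤ (l.length : Int) →
    ((PySem.List.pyRange i (i + (c : Int)) 1).foldl solveStep (cost, l)).1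
      = cost + solveAltGo (c : Int) (l.drop i.toNat) := by
  induction c with
  | zero =>
    intro i cost l hi hlen
    rw [PySem.List.pyRange_one_eq_nil (by omega), solveAltGo]
    simp
  | succ c ih =>
    intro i cost l hi hlen
    have hlenl : i + (c : Int) + 1 <= (l.length : Int) := by push_cast at hlen; omega
    rw [show i + ((c + 1 : Nat) : Int) = i + 1 + (c : Int) by push_cast; ring,
        PySem.List.pyRange_one_cons (by omega)]
    set xs := l.drop i.toNat with hxs
    have hxslen : (xs.length : Int) = (l.length : Int) - i := by
      simp [hxs]; omega
    have hxsne : xs ≠ [] := by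
      intro h; rw [h] at hxslen; simp at hxslen; omega
    obtain ⟨m, hm⟩ : ∃ m, PySem.List.min? xs (fun x => x) = some m := by
      cases h : PySem.List.min? xs (fun x => x) with
      | none => exact absurd ((PySem.List.min?_eq_none_iff xs _).mp h) hxsne
      | some m => exact ⟨m, rfl⟩
    have hmmem : m ∈ xs := PySem.List.min?_mem hm
    obtain ⟨j, hj⟩ : ∃ j, PySem.List.index? xs m = some j := by
      cases h : PySem.List.index? xs m with
      | none => exact absurd ((PySem.List.index?_eq_none_iff xs m).mp h) (by simp [hmmem])
      | some j => exact ⟨j, rfl⟩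
    obtain ⟨hjlt, hjget, -⟩ := PySem.List.getElem_of_index?_eq_some hj
    have hjl : (j : Int) + 1 <= (xs.length : Int) := by exact_mod_cast hjlt
    have hslice : PySem.List.slice l (some i) none = xs := PySem.List.slice_from l hi
    -- one step of the fold
    have hstep : solveStep (cost, l) i =
        (cost + ((j : Int) + 1),
         l.take i.toNat ++ (xs.take (j + 1)).reverse ++ xs.drop (j + 1)) := by
      rw [solveStep]
      simp only [hslice, hm, hj]
      have h1 : PySem.List.slice l (some i) (some (i + (j : Int) + 1)) = xs.take (j + 1) := by
        rw [PySem.List.slice_toNat l hi (by omega), hxs]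
        congr 1
        omega
      have h2 : PySem.List.slice l (some (i + (j : Int) + 1)) none = xs.drop (j + 1) := by
        rw [PySem.List.slice_from l (by omega), hxs, List.drop_drop]
        congr 1
        omega
      have h3 : PySem.List.slice l none (some i) = l.take i.toNat := PySem.List.slice_to l hi
      rw [h1, h2, h3]
      have hlength : (((xs.take (j + 1)).reverse.length : Nat) : Int) = (j : Int) + 1 := by
        simp [List.length_take]
        omega
      rw [hlength]
    rw [List.foldl_cons, hstep]
    set l' := l.take i.toNat ++ (xs.take (j + 1)).reverse ++ xs.drop (j + 1) with hl'
    have htklen : (l.take i.toNat).length = i.toNat := by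
      simp [List.length_take]; omega
    have hl'len : (l'.length : Int) = (l.length : Int) := by
      simp [hl', List.length_take, List.length_drop]
      omega
    have hdrop : l'.drop (i + 1).toNat = (xs.take j).reverse ++ xs.drop (j + 1) := by
      have htake : xs.take (j + 1) = xs.take j ++ [xs[j]] := by
        rw [List.take_add_one]; simp [hjlt]
      have hrev : (xs.take (j + 1)).reverse = xs[j] :: ((xs.take j).reverse) := by
        rw [htake]; simp
      have hone : (i + 1).toNat = i.toNat + 1 := by omega
      rw [hone, hl', hrev, List.append_assoc, List.drop_append, htklen]
      simp
    have := ih (i + 1) (cost + ((j : Int) + 1)) l' (by omega)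
      (by rw [hl'len]; push_cast at hlen ⊢; omega)
    rw [this, hdrop]
    -- unfold one step of B (on the RHS only)
    have hc1 : ¬ ((c : Int) + 1 <= 0) := by omega
    conv_rhs => rw [show (((c + 1 : Nat)) : Int) = (c : Int) + 1 by push_cast; ring, solveAltGo]
    simp only [hm, hj, if_neg hc1]
    rw [PySem.List.slice_to_natCast xs j,
        show ((j : Int) + 1) = (((j + 1 : Nat) : Int)) by push_cast; ring,
        PySem.List.slice_from_natCast xs (j + 1)]
    rw [show (c : Int) + 1 - 1 = (c : Int) by ring]
    ring

-- ===== VERDICT (by name: the statement is the Claim_ definition above) =====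
theorem solve_spec : Claim_equal_solve := by
  intro n l _ hpre
  unfold Spec_solve solve solve_alt
  unfold Pre_solve at hpre
  by_cases h : n - 1 <= 0
  · rw [PySem.List.pyRange_one_eq_nil (by omega), solveAltGo]
    simp [h]
  · have hc : n - 1 = 0 + (((n - 1).toNat : Nat) : Int) := by omega
    rw [hc, solve_key (n - 1).toNat 0 0 l (by omega) (by omega)]
    simp
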